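-- pv_equiv track=rewrite | github.com/utk7arsh/Adaptive-testing-for-infection-spread | algos.py | create_communities
-- ===== SOURCE A (Python) =====
-- def create_communities(N, M):
--     """
--     Function to create communities with approximately equal number of nodes.
--
--     Parameters:
--     N (int): Total number of nodes.
--     M (int): Number of communities.
--
--     Returns:
--     List[List[int]]: 2D array of indices for each community.
--     """
--     communities = []
--     nodes_per_community = N // M
--     extra_nodes = N % M
--
--     start = 0
--     for i in range(M):
--         end = start + nodes_per_community + (1 if i < extra_nodes else 0)
--         communities.append(list(range(start, end)))
--         start = end
--
--     return communities
-- ===== SOURCE B (Python) =====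
-- def create_communities(N, M):
--     """Partition N nodes into M nearly-equal communities (closed-form bounds, no running state)."""
--     q, r = divmod(N, M)
--     return [list(range(i * q + min(i, r), (i + 1) * q + min(i + 1, r)))
--             for i in range(M)]
-- ===== Notes on version B (the rewrite author's own statement) =====
-- stated objective: simpler
-- what changed: Replaces the stateful loop carrying a running `start` accumulator with a single comprehension computing each community's bounds in closed form (start_i = i*q + min(i,r) from divmod(N,M)).
import Mathlib
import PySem

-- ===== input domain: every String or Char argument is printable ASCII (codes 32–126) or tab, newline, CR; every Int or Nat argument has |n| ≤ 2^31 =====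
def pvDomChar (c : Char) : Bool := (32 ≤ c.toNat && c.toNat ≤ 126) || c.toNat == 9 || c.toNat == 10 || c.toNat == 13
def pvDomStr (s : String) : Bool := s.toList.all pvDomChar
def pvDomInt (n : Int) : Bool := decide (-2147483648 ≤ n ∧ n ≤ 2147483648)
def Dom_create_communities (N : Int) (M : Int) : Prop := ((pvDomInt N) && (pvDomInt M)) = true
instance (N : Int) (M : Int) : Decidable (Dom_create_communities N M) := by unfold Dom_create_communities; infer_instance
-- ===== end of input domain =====

-- B replaces A's running `start` accumulator with closed-form per-community bounds (simpler: no mutable state).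


-- ===== PORT A =====
def create_communities (N : Int) (M : Int) : List (List Int) :=
  let nodes_per_community := PySem.Int.floordiv N M
  let extra_nodes := PySem.Int.mod N M
  ((PySem.List.pyRange 0 M 1).foldl
    (fun (st : List (List Int) × Int) i =>
      let «end» := st.2 + nodes_per_community + (if i < extra_nodes then 1 else 0)
      (st.1 ++ [PySem.List.pyRange st.2 «end» 1], «end»))
    ([], 0)).1

-- ===== PORT B =====
def create_communities_alt (N : Int) (M : Int) : List (List Int) :=
  let q := PySem.Int.floordiv N M
  let r := PySem.Int.mod N M
  (PySem.List.pyRange 0 M 1).map (fun i =>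
    PySem.List.pyRange (i * q + min i r) ((i + 1) * q + min (i + 1) r) 1)

-- ===== PRECONDITION & SPEC =====
-- Pre_ excludes exactly M = 0, where Python's N // M raises ZeroDivisionError.
def Pre_create_communities (N : Int) (M : Int) : Prop := M ≠ 0
instance (N : Int) (M : Int) : Decidable (Pre_create_communities N M) := by unfold Pre_create_communities; infer_instance
def pvWitness_create_communities : Int × Int := (7, 3)

def Spec_create_communities (N : Int) (M : Int) (out : List (List Int)) : Prop := out = create_communities_alt N M
instance (N : Int) (M : Int) (out : List (List Int)) : Decidable (Spec_create_communities N M out) := by unfold Spec_create_communities; infer_instance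

-- ===== CLAIM (what is proved, stated in full; the proofs are below) =====
def Claim_equal_create_communities : Prop := ∀ (N : Int) (M : Int), Dom_create_communities N M → Pre_create_communities N M → Spec_create_communities N M (create_communities N M)

-- ===== LEMMAS AND PROOFS =====

-- Loop invariant: starting the fold at index a with accumulator (acc, a*q + min a r)
-- produces acc ++ the closed-form communities for indices a..M-1.
theorem create_communities_invariant (q r M : Int) (a : Int) (acc : List (List Int)) :
    ((PySem.List.pyRange a M 1).foldl
      (fun (st : List (List Int) × Int) i =>
        let e := st.2 + q + (if i < r then 1 else 0)
        (st.1 ++ [PySem.List.pyRange st.2 e 1], e))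
      (acc, a * q + min a r)).1
    = acc ++ (PySem.List.pyRange a M 1).map (fun i =>
        PySem.List.pyRange (i * q + min i r) ((i + 1) * q + min (i + 1) r) 1) := by
  by_cases h : a < M
  · have hn : (M - a).toNat ≠ 0 := by omega
    generalize hk : (M - a).toNat = k at *
    induction k generalizing a acc with
    | zero => omega
    | succ k ih =>
      rw [PySem.List.pyRange_one_cons h]
      simp only [List.foldl_cons, List.map_cons]
      have hstep : a * q + min a r + q + (if a < r then 1 else 0)
          = (a + 1) * q + min (a + 1) r := by
        by_cases hr : a < r
        · simp [hr]; ring_nf; omega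
        · simp [hr]; ring_nf; omega
      rw [hstep]
      by_cases h2 : a + 1 < M
      · have := ih (a + 1) (acc ++ [PySem.List.pyRange (a * q + min a r) ((a + 1) * q + min (a + 1) r) 1]) h2 (by omega) (by omega)
        rw [this]; simp
      · have hnil : PySem.List.pyRange (a + 1) M 1 = [] :=
          PySem.List.pyRange_one_eq_nil (by omega)
        rw [hnil]; simp
  · rw [PySem.List.pyRange_one_eq_nil (by omega)]; simp

-- ===== VERDICT (by name: the statement is the Claim_ definition above) =====
theorem create_communities_spec : Claim_equal_create_communities := by
  intro N M _ hM0
  unfold Spec_create_communities create_communities create_communities_alt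
  by_cases hr : 0 ≤ PySem.Int.mod N M
  · have : min (0:Int) (PySem.Int.mod N M) = 0 := by omega
    have key := create_communities_invariant (PySem.Int.floordiv N M) (PySem.Int.mod N M) M 0 []
    rw [zero_mul, zero_add, this] at key
    simpa using key
  · -- mod has the sign of M; if mod < 0 then M < 0, so the range is empty on both sides
    have hM : M < 0 := by
      by_contra hM
      have hpos : 0 < M := by
        rcases lt_trichotomy M 0 with h | h | h
        · exact absurd h hM
        · exact absurd h hM0
        · exact h
      exact hr (PySem.Int.mod_nonneg N hpos)
    rw [PySem.List.pyRange_one_eq_nil (by omega)]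
    simp
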